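-- pv_equiv track=rewrite | github.com/Bocchiid/WZU-Python-Programming-25fa | Experiment_06/6.1 葡萄酒评论分析报告(project)/葡萄酒评论分析报告——价格最高和葡萄酒评分.py | amount_of_point
-- ===== SOURCE A (Python) =====
-- POINTS = 3
--
-- def amount_of_point(wine_list):
--     """接收列表格式的葡萄酒数据参数，返回每个评分的葡萄酒数量，忽略没有评分的数据
--     例如[...[84, 645], [85, 959],...]表示得分为84的葡萄酒645种，得分85的葡萄酒有959种。
--     @参数 wine_list：葡萄酒数据，列表类型
--     """
--     # 此处补充你的代码
--     wine_dir = {}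
--
--     for x in wine_list:
--         point = x[POINTS]
--
--         if point not in wine_dir:
--             wine_dir[point] = 1
--         else:
--             wine_dir[point] += 1
--
--     res = [[k, v] for k, v in wine_dir.items()]
--     res.sort(key = lambda x: x[0])
--
--     return res
-- ===== SOURCE B (Python) =====
-- POINTS = 3
--
-- def amount_of_point(wine_list):
--     """Sort the score column, then run-length-encode the sorted sequence:
--     each run of equal scores becomes one [score, length] pair (already in
--     ascending score order, so no dict and no final sort of pairs)."""
--     scores = sorted(x[POINTS] for x in wine_list)
--     if not scores:
--         return []
--     res = []
--     run_score, run_count = scores[0], 1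
--     for s in scores[1:]:
--         if s == run_score:
--             run_count += 1
--         else:
--             res.append([run_score, run_count])
--             run_score, run_count = s, 1
--     res.append([run_score, run_count])
--     return res
-- ===== Notes on version B (the rewrite author's own statement) =====
-- stated objective: alternative
-- what changed: Replaces dict-based counting followed by a sort of the [key,value] pairs with a sort of the whole score column followed by a single run-length-encoding scan that groups runs of equal scores; no dictionary is built and the output needs no final sort.
import Mathlib
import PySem

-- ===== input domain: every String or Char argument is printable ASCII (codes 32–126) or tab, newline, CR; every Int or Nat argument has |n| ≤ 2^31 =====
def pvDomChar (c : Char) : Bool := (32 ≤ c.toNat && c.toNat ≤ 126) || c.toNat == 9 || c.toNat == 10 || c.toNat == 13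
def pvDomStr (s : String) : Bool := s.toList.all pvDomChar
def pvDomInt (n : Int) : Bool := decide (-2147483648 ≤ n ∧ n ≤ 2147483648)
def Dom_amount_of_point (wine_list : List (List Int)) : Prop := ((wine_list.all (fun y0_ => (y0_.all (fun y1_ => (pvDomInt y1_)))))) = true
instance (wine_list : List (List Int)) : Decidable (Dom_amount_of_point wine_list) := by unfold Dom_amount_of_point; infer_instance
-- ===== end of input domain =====

-- B replaces dict counting + final pair sort by sorting the score column and
-- run-length-encoding the sorted sequence (alternative algorithm, same result).

-- ===== PORT A =====
def amount_of_point (wine_list : List (List Int)) : List (List Int) :=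
  let wine_dir : PySem.Dict Int Int := wine_list.foldl
    (fun d x =>
      let point := PySem.List.pyGetD x 3 0
      if d.contains point = false then d.insert point 1
      else d.insert point (d.getD point 0 + 1))
    PySem.Dict.empty
  let res := wine_dir.items.map (fun p => [p.1, p.2])
  PySem.List.sorted res (fun x => PySem.List.pyGetD x 0 0)

-- ===== PORT B =====
def amount_of_point_alt (wine_list : List (List Int)) : List (List Int) :=
  let scores := PySem.List.sorted (wine_list.map (fun x => PySem.List.pyGetD x 3 0)) (fun s => s)
  match scores with
  | [] => []
  | s0 :: rest =>
    let st := rest.foldl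
      (fun (st : List (List Int) × Int × Int) s =>
        if s = st.2.1 then (st.1, st.2.1, st.2.2 + 1)
        else (st.1 ++ [[st.2.1, st.2.2]], s, 1))
      ([], s0, 1)
    st.1 ++ [[st.2.1, st.2.2]]

-- ===== PRECONDITION & SPEC =====
-- Pre_ excludes exactly the rows with fewer than 4 fields, on which Python's x[POINTS] raises IndexError.
def Pre_amount_of_point (wine_list : List (List Int)) : Prop :=
  ∀ x ∈ wine_list, 3 < x.length
instance (wine_list : List (List Int)) : Decidable (Pre_amount_of_point wine_list) := by
  unfold Pre_amount_of_point; infer_instance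
def pvWitness_amount_of_point : List (List Int) := [[0, 0, 0, 85], [1, 1, 1, 84], [2, 2, 2, 85]]

def Spec_amount_of_point (wine_list : List (List Int)) (out : List (List Int)) : Prop := out = amount_of_point_alt wine_list
instance (wine_list : List (List Int)) (out : List (List Int)) : Decidable (Spec_amount_of_point wine_list out) := by unfold Spec_amount_of_point; infer_instance

-- ===== CLAIM (what is proved, stated in full; the proofs are below) =====
def Claim_equal_amount_of_point : Prop := ∀ (wine_list : List (List Int)), Dom_amount_of_point wine_list → Pre_amount_of_point wine_list → Spec_amount_of_point wine_list (amount_of_point wine_list)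

-- ===== LEMMAS AND PROOFS =====

-- A's counting loop over wine_list is Counter(scores) for the mapped score column.
theorem aop_fold_eq_counter (wine_list : List (List Int)) :
    wine_list.foldl
      (fun d x =>
        let point := PySem.List.pyGetD x 3 0
        if d.contains point = false then d.insert point 1
        else d.insert point (d.getD point 0 + 1))
      PySem.Dict.empty
    = PySem.Dict.counter (wine_list.map (fun x => PySem.List.pyGetD x 3 0)) := by
  rw [← PySem.Dict.foldl_insert_getD_add_one_eq_counter, List.foldl_map]
  congr 1
  funext d x
  by_cases h : d.contains (PySem.List.pyGetD x 3 0) = false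
  · simp [h, PySem.Dict.getD_of_not_contains d 0 h]
  · simp [h]

-- A's result, in canonical form: one [score, multiplicity] pair per distinct score, ascending.
theorem aop_a_canon (wine_list : List (List Int)) :
    amount_of_point wine_list
      = (PySem.List.sorted (PySem.Set.ofList (wine_list.map (fun x => PySem.List.pyGetD x 3 0))) (fun s => s)).map
          (fun k => [k, ((wine_list.map (fun x => PySem.List.pyGetD x 3 0)).count k : Int)]) := by
  unfold amount_of_point
  simp only [aop_fold_eq_counter, PySem.Dict.items_counter, List.map_map]
  apply PySem.List.sorted_eq_of_perm_of_pairwise_lt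
  · exact (PySem.List.sorted_perm _ _ _).map _
  · rw [List.pairwise_map]
    have := PySem.List.sorted_ofList_pairwise_lt
      (wine_list.map (fun x => PySem.List.pyGetD x 3 0))
    apply this.imp
    intro a b hab
    simpa [PySem.List.pyGetD, PySem.List.pyGet?] using hab

-- set(xs) (first occurrences) is a sublist of xs.
theorem ofList_sublist (xs : List Int) : List.Sublist (PySem.Set.ofList xs) xs := by
  induction xs with
  | nil => simp [PySem.Set.ofList_nil]
  | cons x t ih =>
    rw [PySem.Set.ofList_cons]
    exact List.Sublist.cons₂ x (List.filter_sublist.trans ih)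

-- Reference run-length encoder (proof helper mirroring B's loop state).
def pvRle : List Int → Int → Int → List (List Int)
  | [], rs, rc => [[rs, rc]]
  | s :: t, rs, rc => if s = rs then pvRle t rs (rc + 1) else [rs, rc] :: pvRle t s 1

-- B's foldl with (finished groups, current run) state computes pvRle.
theorem aop_foldl_run (l : List Int) : ∀ (res : List (List Int)) (rs rc : Int),
    (let st := l.foldl
        (fun (st : List (List Int) × Int × Int) s =>
          if s = st.2.1 then (st.1, st.2.1, st.2.2 + 1)
          else (st.1 ++ [[st.2.1, st.2.2]], s, 1))
        (res, rs, rc)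
     st.1 ++ [[st.2.1, st.2.2]]) = res ++ pvRle l rs rc := by
  induction l with
  | nil => intro res rs rc; simp [pvRle]
  | cons s t ih =>
    intro res rs rc
    by_cases h : s = rs
    · simpa [pvRle, h] using ih res rs (rc + 1)
    · simpa [pvRle, h] using ih (res ++ [[rs, rc]]) s 1

-- On a ≤-sorted run list, pvRle yields one pair per distinct value, with multiplicities.
theorem pvRle_canon (l : List Int) : ∀ (rs rc : Int), (rs :: l).Pairwise (· ≤ ·) →
    pvRle l rs rc
      = (PySem.Set.ofList (rs :: l)).map
          (fun k => [k, (if k = rs then rc else 0) + (l.count k : Int)]) := by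
  induction l with
  | nil =>
    intro rs rc _
    simp [pvRle, PySem.Set.ofList_cons, PySem.Set.ofList_nil, PySem.Set.discard]
  | cons s t ih =>
    intro rs rc hp
    have hp' : (s :: t).Pairwise (· ≤ ·) := hp.of_cons
    by_cases h : s = rs
    · subst h
      rw [pvRle, if_pos rfl, ih s (rc + 1) hp']
      have hset : PySem.Set.ofList (s :: s :: t) = PySem.Set.ofList (s :: t) := by
        rw [PySem.Set.ofList_cons (x := s) (xs := s :: t), PySem.Set.ofList_cons (x := s) (xs := t)]
        simp [PySem.Set.discard, List.filter_filter]
      rw [hset]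
      apply List.map_congr_left
      intro k _
      by_cases hk : k = s
      · subst hk; simp; omega
      · have hsk : s ≠ k := fun hEq => hk hEq.symm
        simp [hk, hsk]
    · have hall := (List.pairwise_cons.mp hp).1
      have hnot : rs ∉ (s :: t) := by
        intro hmem
        have hle : rs ≤ s := hall s (by simp)
        rcases List.mem_cons.mp hmem with hEq | hmem'
        · exact h (hEq.symm)
        · have h1 : rs ≤ s := hle
          have h2 : s ≤ rs := ((List.pairwise_cons.mp hp').1 rs hmem')
          exact h (le_antisymm h2 h1)
      rw [pvRle, if_neg h, ih s 1 hp']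
      have hset : PySem.Set.ofList (rs :: s :: t) = rs :: PySem.Set.ofList (s :: t) := by
        rw [PySem.Set.ofList_cons (x := rs)]
        congr 1
        simp only [PySem.Set.discard]
        apply List.filter_eq_self.mpr
        intro a ha
        have hmem : a ∈ (s :: t) := (PySem.Set.mem_ofList _ _).mp ha
        have hne : a ≠ rs := fun hEq => hnot (hEq ▸ hmem)
        simpa using hne
      rw [hset, List.map_cons]
      congr 1
      · have hz : (s :: t).count rs = 0 := List.count_eq_zero.mpr hnot
        simp [hz]
      · apply List.map_congr_left
        intro k hk
        have hkmem : k ∈ (s :: t) := (PySem.Set.mem_ofList _ _).mp hk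
        have hkne : k ≠ rs := fun hEq => hnot (hEq ▸ hkmem)
        by_cases hks : k = s
        · subst hks; simp [hkne]; omega
        · simp [hks, hkne, List.count_cons]; omega

-- B's result in the same canonical form, over the sorted score column S.
theorem aop_b_canon (wine_list : List (List Int)) :
    amount_of_point_alt wine_list
      = (PySem.Set.ofList (PySem.List.sorted (wine_list.map (fun x => PySem.List.pyGetD x 3 0)) (fun s => s))).map
          (fun k => [k, ((PySem.List.sorted (wine_list.map (fun x => PySem.List.pyGetD x 3 0)) (fun s => s)).count k : Int)]) := by
  unfold amount_of_point_alt
  have hpair := PySem.List.sorted_pairwise (wine_list.map (fun x => PySem.List.pyGetD x 3 0)) (fun s => s)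
  generalize hS : PySem.List.sorted (wine_list.map (fun x => PySem.List.pyGetD x 3 0)) (fun s => s) = S at *
  cases S with
  | nil => simp [PySem.Set.ofList_nil]
  | cons s0 rest =>
    show (let st := rest.foldl (fun (st : List (List Int) × Int × Int) s => if s = st.2.1 then (st.1, st.2.1, st.2.2 + 1) else (st.1 ++ [[st.2.1, st.2.2]], s, 1)) ([], s0, 1); st.1 ++ [[st.2.1, st.2.2]]) = _
    rw [aop_foldl_run rest [] s0 1, List.nil_append, pvRle_canon rest s0 1 hpair]
    apply List.map_congr_left
    intro k _
    by_cases hk : k = s0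
    · subst hk; simp; omega
    · have hsk : s0 ≠ k := fun hEq => hk hEq.symm
      simp [hk, hsk]

theorem amount_of_point_spec : Claim_equal_amount_of_point := by
  intro wine_list _ _
  unfold Spec_amount_of_point
  rw [aop_a_canon, aop_b_canon]
  have hperm : (PySem.List.sorted (wine_list.map (fun x => PySem.List.pyGetD x 3 0)) (fun s => s)).Perm
      (wine_list.map (fun x => PySem.List.pyGetD x 3 0)) := PySem.List.sorted_perm _ _ _
  have hofeq : PySem.List.sorted (PySem.Set.ofList (wine_list.map (fun x => PySem.List.pyGetD x 3 0))) (fun s => s)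
      = PySem.Set.ofList (PySem.List.sorted (wine_list.map (fun x => PySem.List.pyGetD x 3 0)) (fun s => s)) := by
    apply PySem.List.sorted_eq_of_perm_of_pairwise_lt
    · apply (List.perm_ext_iff_of_nodup (PySem.Set.nodup_ofList _) (PySem.Set.nodup_ofList _)).mpr
      intro a
      simp only [PySem.Set.mem_ofList]
      exact hperm.mem_iff
    · have hle : (PySem.Set.ofList (PySem.List.sorted (wine_list.map (fun x => PySem.List.pyGetD x 3 0)) (fun s => s))).Pairwise (· ≤ ·) :=
        (PySem.List.sorted_pairwise _ _).sublist (ofList_sublist _)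
      have hnd : (PySem.Set.ofList (PySem.List.sorted (wine_list.map (fun x => PySem.List.pyGetD x 3 0)) (fun s => s))).Nodup :=
        PySem.Set.nodup_ofList _
      exact (hle.and hnd).imp (fun h => lt_of_le_of_ne h.1 h.2)
  rw [hofeq]
  apply List.map_congr_left
  intro k _
  rw [hperm.count_eq]
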